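-- pv_equiv track=rewrite | github.com/avnet-iotconnect/iotc-gg-nucleus-snap | local-ui/app.py | parse_deployment_status
-- ===== SOURCE A (Python) =====
-- def parse_deployment_status(log_lines):
--     status = "unknown"
--     detail = "No deployment signals found."
--
--     for line in reversed(log_lines):
--         if "Deployment" in line and "failed" in line.lower():
--             status = "failed"
--             detail = line
--             break
--         if "Deployment" in line and "successful" in line.lower():
--             status = "successful"
--             detail = line
--             break
--         if "deployment" in line.lower() and "starting" in line.lower():
--             status = "in_progress"
--             detail = line
--             break
--
--     return status, detail
-- ===== SOURCE B (Python) =====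
-- def parse_deployment_status(log_lines):
--     def classify(line):
--         low = line.lower()
--         if "Deployment" in line and "failed" in low:
--             return ("failed", line)
--         if "Deployment" in line and "successful" in low:
--             return ("successful", line)
--         if "deployment" in low and "starting" in low:
--             return ("in_progress", line)
--         return None
--     signals = [c for line in log_lines if (c := classify(line)) is not None]
--     return signals[-1] if signals else ("unknown", "No deployment signals found.")
-- ===== Notes on version B (the rewrite author's own statement) =====
-- stated objective: simpler
-- what changed: Replaces the reversed scan with early break by a classify helper, a forward map/filter over all lines, and taking the last collected signal (or the default when none).
import Mathlib
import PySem

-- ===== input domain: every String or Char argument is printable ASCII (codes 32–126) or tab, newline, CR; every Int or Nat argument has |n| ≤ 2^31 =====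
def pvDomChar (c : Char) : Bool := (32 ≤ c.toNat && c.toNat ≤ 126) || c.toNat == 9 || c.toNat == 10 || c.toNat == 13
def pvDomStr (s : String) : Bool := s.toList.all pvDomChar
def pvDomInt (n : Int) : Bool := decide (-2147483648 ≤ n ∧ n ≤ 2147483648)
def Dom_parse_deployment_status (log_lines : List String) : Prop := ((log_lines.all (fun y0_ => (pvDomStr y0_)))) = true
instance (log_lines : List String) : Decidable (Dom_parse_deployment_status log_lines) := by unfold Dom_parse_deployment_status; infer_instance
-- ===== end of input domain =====

-- B replaces A's reversed scan-with-break by a classify helper, a forward filterMap, and the last collected signal (objective: simpler decomposition).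


-- ===== PORT A =====
-- A's for-loop over reversed(log_lines) with break: structural recursion on the reversed list.
def pvALoop : List String → String × String
  | [] => ("unknown", "No deployment signals found.")
  | line :: rest =>
    if PySem.Str.isIn "Deployment" line && PySem.Str.isIn "failed" (PySem.Str.lower line) then
      ("failed", line)
    else if PySem.Str.isIn "Deployment" line && PySem.Str.isIn "successful" (PySem.Str.lower line) then
      ("successful", line)
    else if PySem.Str.isIn "deployment" (PySem.Str.lower line) && PySem.Str.isIn "starting" (PySem.Str.lower line) then
      ("in_progress", line)
    else
      pvALoop rest

def parse_deployment_status (log_lines : List String) : String × String :=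
  pvALoop log_lines.reverse

-- ===== PORT B =====
def pvClassify (line : String) : Option (String × String) :=
  let low := PySem.Str.lower line
  if PySem.Str.isIn "Deployment" line && PySem.Str.isIn "failed" low then
    some ("failed", line)
  else if PySem.Str.isIn "Deployment" line && PySem.Str.isIn "successful" low then
    some ("successful", line)
  else if PySem.Str.isIn "deployment" low && PySem.Str.isIn "starting" low then
    some ("in_progress", line)
  else
    none

def parse_deployment_status_alt (log_lines : List String) : String × String :=
  ((log_lines.filterMap pvClassify).getLast?).getD ("unknown", "No deployment signals found.")

-- ===== PRECONDITION & SPEC =====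
def Spec_parse_deployment_status (log_lines : List String) (out : String × String) : Prop := out = parse_deployment_status_alt log_lines
instance (log_lines : List String) (out : String × String) : Decidable (Spec_parse_deployment_status log_lines out) := by unfold Spec_parse_deployment_status; infer_instance

-- ===== CLAIM (what is proved, stated in full; the proofs are below) =====
def Claim_equal_parse_deployment_status : Prop := ∀ (log_lines : List String), Dom_parse_deployment_status log_lines → Spec_parse_deployment_status log_lines (parse_deployment_status log_lines)

-- ===== LEMMAS AND PROOFS =====

-- One step of A's loop is exactly pvClassify on the head, falling through to the rest.
theorem pvALoop_cons (line : String) (rest : List String) :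
    pvALoop (line :: rest) = (pvClassify line).getD (pvALoop rest) := by
  simp only [pvALoop, pvClassify]
  split_ifs <;> rfl

-- A's loop on a list is the first classified signal of that list (or the default).
theorem pvALoop_eq_head (l : List String) :
    pvALoop l = ((l.filterMap pvClassify).head?).getD ("unknown", "No deployment signals found.") := by
  induction l with
  | nil => rfl
  | cons line rest ih =>
    rw [pvALoop_cons, List.filterMap_cons]
    cases pvClassify line <;> simp [ih]

-- ===== VERDICT (by name: the statement is the Claim_ definition above) =====
theorem parse_deployment_status_spec : Claim_equal_parse_deployment_status := by
  intro l _
  show parse_deployment_status l = parse_deployment_status_alt l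
  rw [parse_deployment_status, pvALoop_eq_head, parse_deployment_status_alt,
    List.filterMap_reverse, List.head?_reverse]
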